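-- pv_equiv track=rewrite | github.com/wxdangel-ship-it/Highway_Topo_Poc | src/highway_topo_poc/modules/t05_topology_between_rc/qa_audit.py | _merge_evidence_items
-- ===== SOURCE A (Python) =====
-- from typing import Any
--
-- _EVIDENCE_TYPE_ORDER = {
--     "code_ref": 0,
--     "diff_ref": 1,
--     "rule_ref": 2,
--     "pasted_text": 3,
--     "inner_bundle": 4,
--     "prior_report": 5,
-- }
--
-- def _clean_line(value: Any, *, default: str = "NA") -> str:
--     text = str(value or "").strip()
--     if not text:
--         return default
--     return " ".join(text.split())
--
-- def _merge_evidence_items(existing: list[dict[str, str]], new_items: list[dict[str, str]]) -> list[dict[str, str]]: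
--     merged: dict[tuple[str, str, str, str, str], dict[str, str]] = {}
--     for item in [*existing, *new_items]:
--         normalized = {
--             "evidence_type": _clean_line(item.get("evidence_type"), default="code_ref"),
--             "source": _clean_line(item.get("source")),
--             "related_git_sha": _clean_line(item.get("related_git_sha")),
--             "related_run_id": _clean_line(item.get("related_run_id")),
--             "related_patch_id": _clean_line(item.get("related_patch_id")),
--             "note": _clean_line(item.get("note")),
--         }
--         key = (
--             normalized["evidence_type"],
--             normalized["source"],
--             normalized["related_git_sha"],
--             normalized["related_run_id"],
--             normalized["related_patch_id"],
--         )
--         if key not in merged: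
--             merged[key] = normalized
--             continue
--         if normalized["note"] != "NA":
--             merged[key]["note"] = normalized["note"]
--     return sorted(
--         merged.values(),
--         key=lambda item: (
--             _EVIDENCE_TYPE_ORDER.get(item.get("evidence_type", "code_ref"), 99),
--             item.get("source", ""),
--             item.get("related_run_id", ""),
--             item.get("related_patch_id", ""),
--         ),
--     )
-- ===== SOURCE B (Python) =====
-- _EVIDENCE_TYPE_ORDER = {
--     "code_ref": 0,
--     "diff_ref": 1,
--     "rule_ref": 2,
--     "pasted_text": 3,
--     "inner_bundle": 4,
--     "prior_report": 5,
-- }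
--
-- def _clean_line(value, *, default: str = "NA") -> str:
--     text = str(value or "").strip()
--     if not text:
--         return default
--     return " ".join(text.split())
--
-- def _normalize(item):
--     return (
--         _clean_line(item.get("evidence_type"), default="code_ref"),
--         _clean_line(item.get("source")),
--         _clean_line(item.get("related_git_sha")),
--         _clean_line(item.get("related_run_id")),
--         _clean_line(item.get("related_patch_id")),
--         _clean_line(item.get("note")),
--     )
--
-- def _merge_evidence_items(existing, new_items):
--     # pass 1: group the normalized notes per 5-field key, in first-encounter order
--     groups = {}
--     for item in existing + new_items:
--         *key, note = _normalize(item)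
--         groups.setdefault(tuple(key), []).append(note)
--     # pass 2: rebuild one row per group; note = last non-"NA" note, else "NA"
--     rows = []
--     for (et, src, sha, run, patch), notes in groups.items():
--         note = next((n for n in reversed(notes) if n != "NA"), "NA")
--         rows.append({
--             "evidence_type": et,
--             "source": src,
--             "related_git_sha": sha,
--             "related_run_id": run,
--             "related_patch_id": patch,
--             "note": note,
--         })
--     rows.sort(key=lambda row: (
--         _EVIDENCE_TYPE_ORDER.get(row.get("evidence_type", "code_ref"), 99),
--         row.get("source", ""),
--         row.get("related_run_id", ""),
--         row.get("related_patch_id", ""),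
--     ))
--     return rows
-- ===== Notes on version B (the rewrite author's own statement) =====
-- stated objective: alternative
-- what changed: Replaces A's single-pass conditional in-place overwrite of merged dicts with a group-then-reduce decomposition: one pass groups the normalized notes per 5-field key in an ordered dict, a second pass rebuilds each row with the note resolved by a reverse scan (last non-'NA' note, else 'NA'), then the same sort.
import Mathlib
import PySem

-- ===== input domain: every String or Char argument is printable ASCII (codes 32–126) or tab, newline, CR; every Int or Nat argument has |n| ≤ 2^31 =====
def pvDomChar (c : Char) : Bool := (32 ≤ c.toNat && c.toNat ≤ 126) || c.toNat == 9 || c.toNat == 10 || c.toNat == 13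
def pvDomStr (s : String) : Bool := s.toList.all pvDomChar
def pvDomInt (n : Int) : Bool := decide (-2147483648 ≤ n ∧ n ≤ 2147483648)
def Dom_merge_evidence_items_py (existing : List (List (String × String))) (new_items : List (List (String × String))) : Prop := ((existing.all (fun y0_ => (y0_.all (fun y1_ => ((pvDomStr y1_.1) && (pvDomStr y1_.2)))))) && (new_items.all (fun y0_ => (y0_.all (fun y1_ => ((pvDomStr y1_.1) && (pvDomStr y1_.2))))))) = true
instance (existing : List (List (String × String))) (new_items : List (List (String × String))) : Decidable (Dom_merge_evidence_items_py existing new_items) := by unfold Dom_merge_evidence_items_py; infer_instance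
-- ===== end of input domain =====

-- B replaces A's single-pass conditional in-place overwrite with a group-then-reduce decomposition
-- (group notes per key, then resolve each group's note by a reverse scan); same cost, alternative structure.

-- ===== PORT A =====
-- _clean_line (identical helper in Source A and Source B)
def pvClean (value : Option String) (dflt : String) : String :=
  let text := PySem.Str.strip (value.getD "")
  if text = "" then dflt
  else PySem.Str.join " " (PySem.Str.split₀ text)

-- module constant _EVIDENCE_TYPE_ORDER
def pvEvOrder : PySem.Dict String Int :=
  PySem.Dict.ofList [("code_ref", 0), ("diff_ref", 1), ("rule_ref", 2),
                     ("pasted_text", 3), ("inner_bundle", 4), ("prior_report", 5)]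

-- item.get(k, dflt) on a row dict (first match)
def pvRowGet (row : List (String × String)) (k dflt : String) : String :=
  ((row.find? (fun p => p.1 == k)).map (fun p => p.2)).getD dflt

-- the components of the sort key (the identical lambda in Source A's sorted and Source B's sort)
def pvKOrd (row : List (String × String)) : Int := pvEvOrder.getD (pvRowGet row "evidence_type" "code_ref") 99
def pvKSrc (row : List (String × String)) : String := pvRowGet row "source" ""
def pvKRun (row : List (String × String)) : String := pvRowGet row "related_run_id" ""
def pvKPatch (row : List (String × String)) : String := pvRowGet row "related_patch_id" ""

-- Python's ONE stable sort by the 4-tuple key, ported (exact, by stability of both) as a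
-- stable sort by the minor key pair followed by a stable sort by the major key pair
def pvSortRows (rows : List (List (String × String))) : List (List (String × String)) :=
  PySem.List.sorted2 (PySem.List.sorted2 rows pvKRun pvKPatch) pvKOrd pvKSrc

-- the body of A's `for item in [*existing, *new_items]` loop
def pvStepA (merged : PySem.Dict (String × String × String × String × String) (List (String × String)))
    (item : List (String × String)) :
    PySem.Dict (String × String × String × String × String) (List (String × String)) :=
  let d := PySem.Dict.ofList item
  let et := pvClean (d.get? "evidence_type") "code_ref"
  let src := pvClean (d.get? "source") "NA"
  let sha := pvClean (d.get? "related_git_sha") "NA"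
  let run := pvClean (d.get? "related_run_id") "NA"
  let patch := pvClean (d.get? "related_patch_id") "NA"
  let note := pvClean (d.get? "note") "NA"
  let normalized : List (String × String) :=
    [("evidence_type", et), ("source", src), ("related_git_sha", sha),
     ("related_run_id", run), ("related_patch_id", patch), ("note", note)]
  let key := (et, src, sha, run, patch)
  if merged.contains key = false then merged.insert key normalized
  else if note ≠ "NA" then
    -- merged[key]["note"] = note  (in-place update of the "note" entry of the stored row)
    merged.modify key [] (fun old => old.map (fun p => if p.1 = "note" then ("note", note) else p))
  else merged

def merge_evidence_items_py (existing : List (List (String × String))) (new_items : List (List (String × String))) : List (List (String × String)) :=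
  let merged := (existing ++ new_items).foldl pvStepA PySem.Dict.empty
  pvSortRows merged.values

-- ===== PORT B =====
-- Source B's _normalize(item): the 5-field key plus the note
def pvNormB (item : List (String × String)) : (String × String × String × String × String) × String :=
  let d := PySem.Dict.ofList item
  ((pvClean (d.get? "evidence_type") "code_ref",
    pvClean (d.get? "source") "NA",
    pvClean (d.get? "related_git_sha") "NA",
    pvClean (d.get? "related_run_id") "NA",
    pvClean (d.get? "related_patch_id") "NA"),
   pvClean (d.get? "note") "NA")

-- next((n for n in reversed(notes) if n != "NA"), "NA")
def pvResolve (notes : List String) : String :=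
  (notes.reverse.find? (fun n => n != "NA")).getD "NA"

-- the row dict rebuilt from a group
def pvRow (k : String × String × String × String × String) (note : String) : List (String × String) :=
  [("evidence_type", k.1), ("source", k.2.1), ("related_git_sha", k.2.2.1),
   ("related_run_id", k.2.2.2.1), ("related_patch_id", k.2.2.2.2), ("note", note)]

-- groups.setdefault(key, []).append(note)
def pvStepB (g : PySem.Dict (String × String × String × String × String) (List String))
    (item : List (String × String)) :
    PySem.Dict (String × String × String × String × String) (List String) :=
  let kn := pvNormB item
  g.modify kn.1 [] (fun ns => ns ++ [kn.2])

def merge_evidence_items_py_alt (existing : List (List (String × String))) (new_items : List (List (String × String))) : List (List (String × String)) :=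
  let groups := (existing ++ new_items).foldl pvStepB PySem.Dict.empty
  let rows := groups.items.map (fun kn => pvRow kn.1 (pvResolve kn.2))
  pvSortRows rows

-- ===== PRECONDITION & SPEC =====
def Spec_merge_evidence_items_py (existing : List (List (String × String))) (new_items : List (List (String × String))) (out : List (List (String × String))) : Prop := out = merge_evidence_items_py_alt existing new_items
instance (existing : List (List (String × String))) (new_items : List (List (String × String))) (out : List (List (String × String))) : Decidable (Spec_merge_evidence_items_py existing new_items out) := by unfold Spec_merge_evidence_items_py; infer_instance

-- ===== CLAIM (what is proved, stated in full; the proofs are below) =====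
def Claim_equal_merge_evidence_items_py : Prop := ∀ (existing : List (List (String × String))) (new_items : List (List (String × String))), Dom_merge_evidence_items_py existing new_items → Spec_merge_evidence_items_py existing new_items (merge_evidence_items_py existing new_items)

-- ===== LEMMAS AND PROOFS =====

-- the simulation map: a B-group (key, notes) corresponds to A's stored row at that key
def pvF (kn : (String × String × String × String × String) × List String) :
    (String × String × String × String × String) × List (String × String) :=
  (kn.1, pvRow kn.1 (pvResolve kn.2))

lemma pvResolve_singleton (n : String) : pvResolve [n] = n := by
  by_cases h : n = "NA" <;> simp [pvResolve, h]

lemma pvResolve_append (ns : List String) (n : String) :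
    pvResolve (ns ++ [n]) = if n = "NA" then pvResolve ns else n := by
  by_cases h : n = "NA" <;> simp [pvResolve, h]

lemma pv_keys_eq (dA : PySem.Dict (String × String × String × String × String) (List (String × String)))
    (dB : PySem.Dict (String × String × String × String × String) (List String))
    (h : dA.items = dB.items.map pvF) : dA.keys = dB.keys := by
  simp only [PySem.Dict.keys, h, List.map_map]
  rfl

lemma pv_contains_eq (dA : PySem.Dict (String × String × String × String × String) (List (String × String)))
    (dB : PySem.Dict (String × String × String × String × String) (List String))
    (h : dA.items = dB.items.map pvF) (k : String × String × String × String × String) :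
    dA.contains k = dB.contains k := by
  rw [PySem.Dict.contains_eq_decide_mem_keys, PySem.Dict.contains_eq_decide_mem_keys,
      pv_keys_eq dA dB h]

lemma pv_step (dA : PySem.Dict (String × String × String × String × String) (List (String × String)))
    (dB : PySem.Dict (String × String × String × String × String) (List String))
    (hnd : dB.keys.Nodup) (h : dA.items = dB.items.map pvF) (item : List (String × String)) :
    (pvStepA dA item).items = (pvStepB dB item).items.map pvF := by
  simp only [pvStepA, pvStepB, pvNormB]
  generalize pvClean ((PySem.Dict.ofList item).get? "evidence_type") "code_ref" = et
  generalize pvClean ((PySem.Dict.ofList item).get? "source") "NA" = src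
  generalize pvClean ((PySem.Dict.ofList item).get? "related_git_sha") "NA" = sha
  generalize pvClean ((PySem.Dict.ofList item).get? "related_run_id") "NA" = run
  generalize pvClean ((PySem.Dict.ofList item).get? "related_patch_id") "NA" = patch
  generalize pvClean ((PySem.Dict.ofList item).get? "note") "NA" = n
  set k : String × String × String × String × String := (et, src, sha, run, patch) with hk
  have hnodA : dA.keys.Nodup := by rw [pv_keys_eq dA dB h]; exact hnd
  by_cases hc : dB.contains k = true
  · -- key already present
    have hcA : dA.contains k = true := by rw [pv_contains_eq dA dB h]; exact hc
    obtain ⟨ns, hns⟩ : ∃ ns, dB.get? k = some ns := by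
      have hs := PySem.Dict.contains_eq_isSome_get? dB k
      rw [hc] at hs
      exact Option.isSome_iff_exists.mp hs.symm
    have hmem : (k, ns) ∈ dB.items := PySem.Dict.mem_items_of_get?_eq_some dB hns
    have hval : ∀ p ∈ dB.items, p.1 = k → p.2 = ns := by
      intro p hp hpk
      have hg := PySem.Dict.get?_of_mem_items dB (show (p.1, p.2) ∈ dB.items by simpa using hp) hnd
      rw [hpk, hns] at hg
      exact ((Option.some.injEq _ _).mp hg).symm
    have hgA : dA.get? k = some (pvRow k (pvResolve ns)) := by
      refine PySem.Dict.get?_of_mem_items dA ?_ hnodA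
      rw [h]
      exact List.mem_map_of_mem hmem
    simp only [hcA, Bool.true_eq_false, if_false, PySem.Dict.modify,
      PySem.Dict.getD_of_get?_eq_some _ _ hgA, PySem.Dict.getD_of_get?_eq_some _ _ hns]
    by_cases hna : n = "NA"
    · simp only [hna, ne_eq, not_true_eq_false, if_false,
        PySem.Dict.items_insert_of_contains _ _ hc, h, List.map_map]
      refine (List.map_congr_left ?_)
      intro p hp
      by_cases hpk : p.1 = k
      · obtain ⟨p1, p2⟩ := p
        have hp2 : p2 = ns := hval _ hp hpk
        subst hp2
        have hp1 : p1 = k := hpk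
        subst hp1
        simp [pvF, pvResolve_append]
      · simp [Function.comp_apply, hpk, pvF]
    · simp only [ne_eq, hna, not_false_eq_true, if_true,
        PySem.Dict.items_insert_of_contains _ _ hcA, PySem.Dict.items_insert_of_contains _ _ hc,
        h, List.map_map]
      refine (List.map_congr_left ?_)
      intro p hp
      by_cases hpk : p.1 = k
      · obtain ⟨p1, p2⟩ := p
        have hp2 : p2 = ns := hval _ hp hpk
        subst hp2
        have hp1 : p1 = k := hpk
        subst hp1
        simp [pvF, pvRow, pvResolve_append, hna]
      · simp [Function.comp_apply, hpk, pvF]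
  · -- fresh key
    rw [Bool.not_eq_true] at hc
    have hcA : dA.contains k = false := by rw [pv_contains_eq dA dB h]; exact hc
    simp only [hcA, if_true, PySem.Dict.modify, PySem.Dict.getD_of_not_contains _ _ hc,
      List.nil_append, PySem.Dict.items_insert_of_not_contains _ _ hcA,
      PySem.Dict.items_insert_of_not_contains _ _ hc, List.map_append, h]
    simp [pvF, pvResolve_singleton, pvRow]
    exact ⟨rfl, rfl, rfl, rfl, rfl⟩

lemma pv_inv (l : List (List (String × String))) :
    ∀ (dB : PySem.Dict (String × String × String × String × String) (List String))
      (dA : PySem.Dict (String × String × String × String × String) (List (String × String))),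
      dB.keys.Nodup → dA.items = dB.items.map pvF →
      (l.foldl pvStepA dA).items = (l.foldl pvStepB dB).items.map pvF := by
  induction l with
  | nil => intro dB dA _ h; simpa using h
  | cons i t ih =>
    intro dB dA hnd h
    simp only [List.foldl_cons]
    refine ih (pvStepB dB i) (pvStepA dA i) ?_ (pv_step dA dB hnd h i)
    · unfold pvStepB PySem.Dict.modify
      exact PySem.Dict.nodup_keys_insert _ _ _ hnd

-- ===== VERDICT (by name: the statement is the Claim_ definition above) =====
theorem merge_evidence_items_py_spec : Claim_equal_merge_evidence_items_py := by
  intro existing new_items _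
  unfold Spec_merge_evidence_items_py merge_evidence_items_py merge_evidence_items_py_alt
  have h := pv_inv (existing ++ new_items) PySem.Dict.empty PySem.Dict.empty
      PySem.Dict.nodup_keys_empty (by rfl)
  simp only [PySem.Dict.values, h, List.map_map]
  rfl
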